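-- pv_equiv track=rewrite | github.com/ArchipelagoMW/Archipelago | worlds/oot/texture_util.py | rgba16_to_ci8
-- ===== SOURCE A (Python) =====
-- def rgba16_to_ci8(rgba16_texture):
--     ci8_texture = []
--     palette = get_colors_from_rgba16(rgba16_texture) # Get all of the colors in the texture
--     if len(palette) > 0x100: # Make sure there are <= 256 colors. Could probably do some fancy stuff to convert, but nah.
--         raise(Exception("RGB Texture exceeds maximum of 256 colors"))
--     if len(palette) < 0x100: #Pad the palette with 0x0001 #Pad the palette with 0001s to take up the full 256 colors
--         for i in range(0, 0x100 - len(palette)):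
--             palette.append(0x0001)
--
--     # Create the new ci8 texture (list of bytes) by locating the index of each color from the rgba16 texture in the color palette.
--     for pixel in rgba16_texture:
--         if pixel in palette:
--             ci8_texture.append(palette.index(pixel))
--     return (ci8_texture, palette)
--
-- def get_colors_from_rgba16(rgba16_texture):
--     colors = []
--     for pixel in rgba16_texture:
--         if pixel not in colors:
--             colors.append(pixel)
--     return colors
-- ===== SOURCE B (Python) =====
-- def rgba16_to_ci8(rgba16_texture):
--     # Single pass: build palette (color -> first-seen index) and indexed texture together.
--     index_of = {}
--     ci8_texture = []
--     for pixel in rgba16_texture: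
--         if pixel not in index_of:
--             index_of[pixel] = len(index_of)
--         ci8_texture.append(index_of[pixel])
--     if len(index_of) > 0x100:
--         raise Exception("RGB Texture exceeds maximum of 256 colors")
--     palette = list(index_of) + [0x0001] * (0x100 - len(index_of))
--     return (ci8_texture, palette)
-- ===== Notes on version B (the rewrite author's own statement) =====
-- stated objective: faster
-- what changed: A makes three passes (dedup scan building the palette, then for each pixel a linear membership test plus a linear palette.index scan); B makes one pass with a color->index dict that assigns the next index on first sight, emitting each pixel's index immediately, then pads the palette once.
import Mathlib
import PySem

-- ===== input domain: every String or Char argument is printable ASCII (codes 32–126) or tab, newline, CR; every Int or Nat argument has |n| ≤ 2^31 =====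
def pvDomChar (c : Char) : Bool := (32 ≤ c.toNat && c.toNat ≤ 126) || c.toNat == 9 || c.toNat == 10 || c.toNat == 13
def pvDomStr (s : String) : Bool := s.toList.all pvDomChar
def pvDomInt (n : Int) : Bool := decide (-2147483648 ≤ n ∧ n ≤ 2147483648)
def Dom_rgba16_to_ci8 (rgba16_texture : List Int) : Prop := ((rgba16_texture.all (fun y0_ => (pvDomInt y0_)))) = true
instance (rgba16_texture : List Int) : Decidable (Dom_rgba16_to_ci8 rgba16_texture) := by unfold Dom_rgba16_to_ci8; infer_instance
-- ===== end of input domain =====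

-- B fuses A's separate scans (palette dedup, then per-pixel membership test + palette.index) into
-- one pass with a color->index dict. Pre_ excludes inputs with > 256 distinct colors, on which
-- both Pythons raise the Exception.


-- ===== PORT A =====
-- helper get_colors_from_rgba16: ordered dedup by a membership-scan loop
def get_colors_from_rgba16 (rgba16_texture : List Int) : List Int :=
  rgba16_texture.foldl (fun colors pixel => if pixel ∈ colors then colors else colors ++ [pixel]) []

def rgba16_to_ci8 (rgba16_texture : List Int) : List Int × List Int :=
  let palette := get_colors_from_rgba16 rgba16_texture
  if palette.length > 256 then ([], [])  -- Python: raise Exception (excluded by Pre_)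
  else
    let palette :=
      if palette.length < 256 then
        (PySem.List.pyRange 0 (256 - (palette.length : Int)) 1).foldl
          (fun p _ => p ++ [(1 : Int)]) palette
      else palette
    (rgba16_texture.foldl
      (fun acc pixel =>
        if pixel ∈ palette then
          acc ++ [(((PySem.List.index? palette pixel).getD 0 : Nat) : Int)]  -- palette.index(pixel); guarded by the membership test
        else acc) [],
     palette)

-- ===== PORT B =====
def rgba16_to_ci8_alt (rgba16_texture : List Int) : List Int × List Int :=
  let st := rgba16_texture.foldl
    (fun (st : PySem.Dict Int Int × List Int) pixel =>
      let d := if st.1.contains pixel then st.1 else st.1.insert pixel (st.1.size : Int)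
      (d, st.2 ++ [d.getD pixel 0]))  -- index_of[pixel]: present by construction
    (PySem.Dict.empty, [])
  if st.1.size > 256 then ([], [])  -- Python: raise Exception (excluded by Pre_)
  else (st.2, st.1.keys ++ List.replicate (256 - st.1.size) (1 : Int))

-- ===== PRECONDITION & SPEC =====
-- Pre_ excludes exactly the inputs with more than 256 distinct colors, on which A raises.
def Pre_rgba16_to_ci8 (rgba16_texture : List Int) : Prop :=
  (PySem.Set.ofList rgba16_texture).length ≤ 256
instance (rgba16_texture : List Int) : Decidable (Pre_rgba16_to_ci8 rgba16_texture) := by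
  unfold Pre_rgba16_to_ci8; infer_instance
def pvWitness_rgba16_to_ci8 : List Int := [5, 7, 5, 3]

def Spec_rgba16_to_ci8 (rgba16_texture : List Int) (out : List Int × List Int) : Prop := out = rgba16_to_ci8_alt rgba16_texture
instance (rgba16_texture : List Int) (out : List Int × List Int) : Decidable (Spec_rgba16_to_ci8 rgba16_texture out) := by unfold Spec_rgba16_to_ci8; infer_instance

-- ===== CLAIM (what is proved, stated in full; the proofs are below) =====
def Claim_equal_rgba16_to_ci8 : Prop := ∀ (rgba16_texture : List Int), Dom_rgba16_to_ci8 rgba16_texture → Pre_rgba16_to_ci8 rgba16_texture → Spec_rgba16_to_ci8 rgba16_texture (rgba16_to_ci8 rgba16_texture)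

-- ===== LEMMAS AND PROOFS =====

-- A's dedup loop, started from an arbitrary accumulator.
def gcFrom (acc : List Int) (t : List Int) : List Int :=
  t.foldl (fun colors pixel => if pixel ∈ colors then colors else colors ++ [pixel]) acc

theorem gcFrom_cons (acc : List Int) (p : Int) (t : List Int) :
    gcFrom acc (p :: t) = gcFrom (if p ∈ acc then acc else acc ++ [p]) t := rfl

theorem gc_eq_gcFrom (t : List Int) : get_colors_from_rgba16 t = gcFrom [] t := rfl

theorem subset_gcFrom (acc t : List Int) : acc ⊆ gcFrom acc t := by
  induction t generalizing acc with
  | nil => simp [gcFrom]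
  | cons p t ih =>
    rw [gcFrom_cons]
    intro x hx
    exact ih _ (by split <;> simp [hx])

theorem mem_gcFrom_of_mem (acc t : List Int) (p : Int) (hp : p ∈ t) : p ∈ gcFrom acc t := by
  induction t generalizing acc with
  | nil => cases hp
  | cons q t ih =>
    rw [gcFrom_cons]
    rcases List.mem_cons.1 hp with h | h
    · subst h
      exact subset_gcFrom _ _ (by split <;> simp_all)
    · exact ih _ h

-- first-occurrence indices are stable as the dedup list grows
theorem index?_gcFrom (acc t : List Int) (p : Int) (hp : p ∈ acc) :
    PySem.List.index? (gcFrom acc t) p = PySem.List.index? acc p := by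
  induction t generalizing acc with
  | nil => rfl
  | cons q t ih =>
    rw [gcFrom_cons]
    split
    · exact ih _ hp
    · rw [ih _ (by simp [hp]), PySem.List.index?_append_of_mem _ hp]

-- the dict B maintains: colors of the processed prefix, paired with their indices from `off`
def dI (cs : List Int) (off : Nat) : PySem.Dict Int Int :=
  PySem.Dict.mk ((cs.zipIdx off).map (fun ci => (ci.1, (ci.2 : Int))))

theorem get?_dI (cs : List Int) (off : Nat) (x : Int) :
    (dI cs off).get? x = (PySem.List.index? cs x).map (fun k => ((k + off : Nat) : Int)) := by
  induction cs generalizing off with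
  | nil => rfl
  | cons c cs ih =>
    rw [show (dI (c :: cs) off) = PySem.Dict.mk ((c, (off : Int)) :: ((cs.zipIdx (off+1)).map (fun ci => (ci.1, (ci.2 : Int))))) by simp [dI, List.zipIdx_cons]]
    rw [PySem.Dict.get?_mk_cons]
    rw [show PySem.Dict.mk ((cs.zipIdx (off+1)).map (fun ci => (ci.1, (ci.2 : Int)))) = dI cs (off+1) from rfl]
    by_cases hc : c = x
    · subst hc
      rw [PySem.List.index?_cons_self]
      simp
    · rw [PySem.List.index?_cons_of_ne cs hc, ih]
      simp only [show (c == x) = false by simp [hc], Bool.false_eq_true, if_false]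
      rcases PySem.List.index? cs x with _ | k
      · simp
      · simp
        omega

theorem keys_dI (cs : List Int) (off : Nat) : (dI cs off).keys = cs := by
  induction cs generalizing off with
  | nil => rfl
  | cons c cs ih => simp [dI, List.zipIdx_cons, PySem.Dict.keys] at *; exact ih (off+1)

theorem size_dI (cs : List Int) (off : Nat) : (dI cs off).size = cs.length := by
  simp [dI, PySem.Dict.size]

theorem contains_dI (cs : List Int) (off : Nat) (x : Int) :
    (dI cs off).contains x = decide (x ∈ cs) := by
  rw [PySem.Dict.contains_eq_isSome_get?, get?_dI]
  rcases h : PySem.List.index? cs x with _ | k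
  · simp [(PySem.List.index?_eq_none_iff _ _).1 h]
  · have hx : x ∈ cs := (PySem.List.index?_isSome_iff _ _).1 (by rw [h]; rfl)
    simp [hx]

theorem dI_step (cs : List Int) (p : Int) :
    (if (dI cs 0).contains p then dI cs 0 else (dI cs 0).insert p ((dI cs 0).size : Int)) =
      dI (if p ∈ cs then cs else cs ++ [p]) 0 := by
  rw [contains_dI]
  by_cases hp : p ∈ cs
  · simp [hp]
  · rw [show (decide (p ∈ cs)) = false by simp [hp]]
    simp only [Bool.false_eq_true, if_false, if_neg hp]
    rw [size_dI]
    apply PySem.Dict.ext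
    rw [PySem.Dict.items_insert_of_not_contains _ _ (by rw [contains_dI]; simp [hp])]
    simp [dI, List.zipIdx_append, List.zipIdx_cons]

-- B's loop invariant: from (dI cs 0, acc), processing t yields the dedup dict of cs + t and
-- the indices of each pixel in the FINAL dedup list (indices are stable, index?_gcFrom).
theorem B_loop (t : List Int) (cs acc : List Int) :
    t.foldl
      (fun (st : PySem.Dict Int Int × List Int) pixel =>
        let d := if st.1.contains pixel then st.1 else st.1.insert pixel (st.1.size : Int)
        (d, st.2 ++ [d.getD pixel 0]))
      (dI cs 0, acc) =
    (dI (gcFrom cs t) 0,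
     acc ++ t.map (fun p => (((PySem.List.index? (gcFrom cs t) p).getD 0 : Nat) : Int))) := by
  induction t generalizing cs acc with
  | nil => simp [gcFrom]
  | cons p t ih =>
    rw [List.foldl_cons]
    simp only [dI_step]
    rw [ih]
    rw [gcFrom_cons]
    set cs' := if p ∈ cs then cs else cs ++ [p] with hcs'
    have hpmem : p ∈ cs' := by rw [hcs']; split <;> simp_all
    have hidx : PySem.List.index? (gcFrom cs' t) p = PySem.List.index? cs' p :=
      index?_gcFrom _ _ _ hpmem
    have hget : (dI cs' 0).getD p 0 = (((PySem.List.index? (gcFrom cs' t) p).getD 0 : Nat) : Int) := by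
      rw [hidx, PySem.Dict.getD_eq_get?_getD, get?_dI]
      rcases h : PySem.List.index? cs' p with _ | k
      · exact absurd hpmem ((PySem.List.index?_eq_none_iff _ _).1 h)
      · simp
    rw [hget]
    simp

-- A's index-relocation loop is a map over the texture (every pixel is in the padded palette,
-- and padding does not move first-occurrence indices).
theorem A_loop (t pal pad : List Int) (hpal : ∀ p ∈ t, p ∈ pal) :
    t.foldl
      (fun acc pixel =>
        if pixel ∈ pal ++ pad then
          acc ++ [(((PySem.List.index? (pal ++ pad) pixel).getD 0 : Nat) : Int)]
        else acc) [] =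
    t.map (fun p => (((PySem.List.index? pal p).getD 0 : Nat) : Int)) := by
  have h1 := PySem.List.foldl_congr_mem' t
      (fun acc pixel => if pixel ∈ pal ++ pad then acc ++ [(((PySem.List.index? (pal ++ pad) pixel).getD 0 : Nat) : Int)] else acc)
      (fun acc p => acc ++ [(((PySem.List.index? pal p).getD 0 : Nat) : Int)]) []
      (by
        intro x hx acc
        simp only [if_pos (List.mem_append_left _ (hpal x hx)),
            PySem.List.index?_append_of_mem _ (hpal x hx)])
  rw [h1, PySem.List.foldl_append_singleton_eq_map]
  simp

-- A's padding loop appends (256 - len) copies of 1.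
theorem A_pad (pal : List Int) (h : pal.length ≤ 256) :
    (if pal.length < 256 then
        (PySem.List.pyRange 0 (256 - (pal.length : Int)) 1).foldl
          (fun p _ => p ++ [(1 : Int)]) pal
      else pal) = pal ++ List.replicate (256 - pal.length) (1 : Int) := by
  by_cases hlt : pal.length < 256
  · rw [if_pos hlt]
    rw [show (256 - (pal.length : Int)) = ((256 - pal.length : Nat) : Int) by omega]
    rw [PySem.List.pyRange_zero_natCast]
    rw [PySem.List.foldl_append_singleton_eq_map (f := fun _ => (1 : Int))]
    simp [Function.comp_def]
  · rw [if_neg hlt]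
    rw [show 256 - pal.length = 0 by omega]
    simp

-- A's dedup loop is Python's set-of-list in first-insertion order (ties Pre_ to A's palette).
theorem gc_eq_set (t : List Int) : gcFrom [] t = PySem.Set.ofList t := by
  rw [PySem.Set.ofList_eq_foldl, gcFrom]
  congr 1
  funext s x
  simp [PySem.Set.add, PySem.Set.contains]

-- both ports, evaluated against the same canonical value
theorem A_val (t : List Int) (h : (gcFrom [] t).length ≤ 256) :
    rgba16_to_ci8 t =
      (t.map (fun p => (((PySem.List.index? (gcFrom [] t) p).getD 0 : Nat) : Int)),
       gcFrom [] t ++ List.replicate (256 - (gcFrom [] t).length) (1 : Int)) := by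
  unfold rgba16_to_ci8
  rw [gc_eq_gcFrom]
  simp only [if_neg (by omega : ¬ (gcFrom [] t).length > 256)]
  rw [A_pad _ h]
  rw [A_loop t _ _ (fun p hp => mem_gcFrom_of_mem [] t p hp)]

theorem B_val (t : List Int) (h : (gcFrom [] t).length ≤ 256) :
    rgba16_to_ci8_alt t =
      (t.map (fun p => (((PySem.List.index? (gcFrom [] t) p).getD 0 : Nat) : Int)),
       gcFrom [] t ++ List.replicate (256 - (gcFrom [] t).length) (1 : Int)) := by
  unfold rgba16_to_ci8_alt
  rw [show ((PySem.Dict.empty : PySem.Dict Int Int), ([] : List Int)) = (dI [] 0, ([] : List Int)) from rfl]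
  rw [B_loop t [] []]
  simp only [size_dI, keys_dI]
  rw [if_neg (by omega : ¬ (gcFrom [] t).length > 256)]
  simp

-- ===== VERDICT (by name: the statement is the Claim_ definition above) =====
theorem rgba16_to_ci8_spec : Claim_equal_rgba16_to_ci8 := by
  intro t _ hpre
  have h : (gcFrom [] t).length ≤ 256 := by
    rw [gc_eq_set]; exact hpre
  unfold Spec_rgba16_to_ci8
  rw [A_val t h, B_val t h]
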